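-- pv_equiv track=rewrite | github.com/letmeentertainyou/Advent-of-Code | 2024/days/02/two.py | find_safe
-- ===== SOURCE A (Python) =====
-- def find_safe(line: list[int]) -> bool:
--     # determine if the line ascends or descends
--     s = sorted(line)
--     if not ((line == s) or (line[::-1] == s)):
--         return False
--
--     for i, current in enumerate(line):
--         # This avoids an index error.
--         if i + 1 < len(line):
--             diff = abs(current - line[i + 1])
--             # if not (1 <= diff <= 3):
--             #    return False
--     return True
-- ===== SOURCE B (Python) =====
-- def find_safe(line: list[int]) -> bool:
--     # One linear pass: track whether the list is non-decreasing and non-increasing.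
--     inc = dec = True
--     for a, b in zip(line, line[1:]):
--         if a < b:
--             dec = False
--         elif b < a:
--             inc = False
--     return inc or dec
-- ===== Notes on version B (the rewrite author's own statement) =====
-- stated objective: faster
-- what changed: Replaced sort-and-compare (plus a dead enumerate loop) with a single linear pass over adjacent pairs maintaining non-decreasing/non-increasing flags.
import Mathlib
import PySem

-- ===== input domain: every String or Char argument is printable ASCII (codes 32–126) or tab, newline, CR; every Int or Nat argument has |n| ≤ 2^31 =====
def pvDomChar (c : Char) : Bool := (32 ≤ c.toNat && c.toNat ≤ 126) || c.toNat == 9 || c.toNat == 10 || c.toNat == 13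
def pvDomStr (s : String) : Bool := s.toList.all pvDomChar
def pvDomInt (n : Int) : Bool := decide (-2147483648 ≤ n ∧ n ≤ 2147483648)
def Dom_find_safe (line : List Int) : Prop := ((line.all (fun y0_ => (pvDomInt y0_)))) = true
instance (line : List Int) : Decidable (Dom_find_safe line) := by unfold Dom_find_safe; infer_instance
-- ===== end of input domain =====

-- B replaces A's sort-and-compare monotonicity test with a single linear pass over adjacent pairs (measured faster).

-- ===== PORT A =====
-- A: sort the list; return False unless the list equals sorted(line) or its reverse does;
-- then a loop over enumerate whose body computes an unused |diff| (the check is commented out) and return True.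
def find_safe (line : List Int) : Bool :=
  let s := PySem.List.sorted line (fun x => x) false
  if !((line == s) || (((PySem.List.slice? line none none (-1)).getD []) == s)) then
    false
  else
    (PySem.List.enumerate line 0).foldl
      (fun acc (p : Int × Int) =>
        if p.1 + 1 < (line.length : Int) then
          let _diff := (p.2 - (PySem.List.pyGet? line (p.1 + 1)).getD 0).natAbs
          acc
        else acc) true

-- ===== PORT B =====
-- B: one pass over zip(line, line[1:]) keeping (inc, dec) flags.
def find_safe_alt (line : List Int) : Bool :=
  let st := (line.zip (PySem.List.slice line (some 1) none)).foldl
    (fun (st : Bool × Bool) (p : Int × Int) =>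
      if p.1 < p.2 then (st.1, false)
      else if p.2 < p.1 then (false, st.2)
      else st) (true, true)
  st.1 || st.2

-- ===== PRECONDITION & SPEC =====
def Spec_find_safe (line : List Int) (out : Bool) : Prop := out = find_safe_alt line
instance (line : List Int) (out : Bool) : Decidable (Spec_find_safe line out) := by unfold Spec_find_safe; infer_instance

-- ===== CLAIM (what is proved, stated in full; the proofs are below) =====
def Claim_equal_find_safe : Prop := ∀ (line : List Int), Dom_find_safe line → Spec_find_safe line (find_safe line)

-- ===== LEMMAS AND PROOFS =====

-- A's enumerate loop never changes the accumulator.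
theorem find_safe_loop_const (line : List Int) (ps : List (Int × Int)) (acc : Bool) :
    ps.foldl
      (fun acc (p : Int × Int) =>
        if p.1 + 1 < (line.length : Int) then
          let _diff := (p.2 - (PySem.List.pyGet? line (p.1 + 1)).getD 0).natAbs
          acc
        else acc) acc = acc := by
  induction ps generalizing acc with
  | nil => rfl
  | cons p t ih => simp only [List.foldl_cons]; split <;> exact ih _

-- B's fold computes the two monotonicity flags.
theorem flags_foldl (ps : List (Int × Int)) (i d : Bool) :
    ps.foldl
      (fun (st : Bool × Bool) (p : Int × Int) =>
        if p.1 < p.2 then (st.1, false)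
        else if p.2 < p.1 then (false, st.2)
        else st) (i, d)
    = (i && ps.all (fun p => !decide (p.2 < p.1)),
       d && ps.all (fun p => !decide (p.1 < p.2))) := by
  induction ps generalizing i d with
  | nil => simp
  | cons p t ih =>
    simp only [List.foldl_cons, List.all_cons]
    by_cases h1 : p.1 < p.2
    · have h2 : ¬ p.2 < p.1 := by omega
      simp [h1, h2, ih]
    · by_cases h2 : p.2 < p.1
      · simp [h1, h2, ih]
      · simp [h1, h2, ih]

-- zip-with-tail all ↔ Chain'
theorem zip_tail_all_iff (r : Int → Int → Prop) [DecidablePred fun p : Int × Int => r p.1 p.2]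
    (l : List Int) :
    (l.zip l.tail).all (fun p => decide (r p.1 p.2)) = true ↔ List.IsChain r l := by
  induction l with
  | nil => simp
  | cons a t ih =>
    cases t with
    | nil => simp
    | cons b u =>
      simp only [List.tail_cons, List.zip_cons_cons, List.all_cons, Bool.and_eq_true,
        decide_eq_true_eq, List.isChain_cons_cons]
      exact and_congr Iff.rfl ih

-- line equals its sort iff it is non-decreasing.
theorem eq_sorted_iff (line : List Int) :
    line = PySem.List.sorted line (fun x => x) false ↔ line.Pairwise (fun a b => a ≤ b) := by
  constructor
  · intro h
    have := PySem.List.sorted_pairwise line (fun x => x)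
    rw [← h] at this
    exact this
  · intro h
    exact (PySem.List.sorted_eq_self_of_pairwise line (fun x => x) h).symm

-- reverse of line equals its sort iff line is non-increasing.
theorem rev_eq_sorted_iff (line : List Int) :
    line.reverse = PySem.List.sorted line (fun x => x) false ↔ line.Pairwise (fun a b => b ≤ a) := by
  constructor
  · intro h
    have := PySem.List.sorted_pairwise line (fun x => x)
    rw [← h] at this
    simpa [List.pairwise_reverse] using this
  · intro h
    have hp : line.reverse.Pairwise (fun a b : Int => a ≤ b) := by
      simpa [List.pairwise_reverse] using h
    exact (PySem.List.sorted_id_eq_of_perm_of_pairwise line line.reverse (List.reverse_perm line) hp).symm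

theorem decide_fun_ge : (fun p : Int × Int => !decide (p.2 < p.1)) = (fun p : Int × Int => decide (p.1 ≤ p.2)) := by
  funext p; rw [← decide_not]; exact decide_eq_decide.mpr (by omega)

theorem decide_fun_le : (fun p : Int × Int => !decide (p.1 < p.2)) = (fun p : Int × Int => decide (p.2 ≤ p.1)) := by
  funext p; rw [← decide_not]; exact decide_eq_decide.mpr (by omega)

theorem all_inc_iff (l : List Int) :
    ((l.zip l.tail).all (fun p => !decide (p.2 < p.1)) = true) ↔ l.Pairwise (fun a b => a ≤ b) := by
  rw [decide_fun_ge]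
  exact (zip_tail_all_iff (fun a b : Int => a ≤ b) l).trans (List.isChain_iff_pairwise)

theorem all_dec_iff (l : List Int) :
    ((l.zip l.tail).all (fun p => !decide (p.1 < p.2)) = true) ↔ l.Pairwise (fun a b => b ≤ a) := by
  rw [decide_fun_le]
  haveI : IsTrans Int (fun a b : Int => b ≤ a) := ⟨fun _ _ _ h1 h2 => le_trans h2 h1⟩
  exact (zip_tail_all_iff (fun a b : Int => b ≤ a) l).trans (List.isChain_iff_pairwise)

theorem if_not_false_true (c : Bool) : (if !c then false else true) = c := by cases c <;> rfl

-- ===== VERDICT (by name: the statement is the Claim_ definition above) =====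
theorem find_safe_spec : Claim_equal_find_safe := by
  intro line _
  unfold Spec_find_safe find_safe find_safe_alt
  simp only [PySem.List.slice?_none_none_neg_one, Option.getD_some,
    PySem.List.slice_from_one, flags_foldl, Bool.true_and, find_safe_loop_const,
    if_not_false_true]
  rw [Bool.eq_iff_iff]
  simp only [Bool.or_eq_true, beq_iff_eq]
  exact or_congr ((eq_sorted_iff line).trans (all_inc_iff line).symm)
    ((rev_eq_sorted_iff line).trans (all_dec_iff line).symm)
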